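-- pv_equiv track=rewrite | github.com/yxuaren/Universe | a1.py | triple_vowels
-- ===== SOURCE A (Python) =====
-- def triple_vowels(text):
--     """Return a new version of text, with all the vowels tripled.
--     For example:  "The *BIG BAD* wolf!" => "Theee "BIIIG BAAAD* wooolf!".
--     For this exercise assume the vowels are
--     the characters A,E,I,O, and U (and a,e,i,o, and u).
--     Maintain the case of the characters."""
--     vowels = ['A','E','I','O','U','a','e','i','o','u']
--     results = ''
--     for i in text:
--         if i in vowels:
--             results = results + 3*i
--         else:
--             results = results + i
--     return results
-- ===== SOURCE B (Python) =====
-- def triple_vowels(text):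
--     """Return a new version of text, with all the vowels tripled."""
--     table = {ord(v): v * 3 for v in 'AEIOUaeiou'}
--     return text.translate(table)
-- ===== Notes on version B (the rewrite author's own statement) =====
-- stated objective: idiomatic
-- what changed: Replaces the explicit loop with membership test and repeated string concatenation by a precomputed translation table applied in one str.translate call.
import Mathlib
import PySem

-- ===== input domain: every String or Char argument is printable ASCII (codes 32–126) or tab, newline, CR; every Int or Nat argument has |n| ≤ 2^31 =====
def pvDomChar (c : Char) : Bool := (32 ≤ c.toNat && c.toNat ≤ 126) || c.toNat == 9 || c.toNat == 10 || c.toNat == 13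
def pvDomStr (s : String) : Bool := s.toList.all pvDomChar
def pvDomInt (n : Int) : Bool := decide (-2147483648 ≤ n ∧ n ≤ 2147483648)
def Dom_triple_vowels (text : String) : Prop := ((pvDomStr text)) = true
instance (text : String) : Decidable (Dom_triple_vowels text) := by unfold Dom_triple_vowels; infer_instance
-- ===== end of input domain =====

-- B replaces A's explicit loop (membership test + string concatenation) by a precomputed
-- translation table applied in a single translate pass (idiomatic; return value only).

-- ===== PORT A =====
def triple_vowels (text : String) : String :=
  let vowels : List Char := ['A','E','I','O','U','a','e','i','o','u']
  String.ofList (text.toList.foldl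
    (fun results i => if i ∈ vowels then results ++ [i, i, i] else results ++ [i]) [])

-- ===== PORT B =====
-- the translation table {ord(v): v*3 for v in 'AEIOUaeiou'}
def tvTable : PySem.Dict Char (List Char) :=
  "AEIOUaeiou".toList.foldl (fun d v => d.insert v [v, v, v]) PySem.Dict.empty

-- text.translate(table): each char is replaced by its table entry, or kept if absent
def triple_vowels_alt (text : String) : String :=
  String.ofList (text.toList.flatMap (fun c => (tvTable.get? c).getD [c]))

-- ===== PRECONDITION & SPEC =====
def Spec_triple_vowels (text : String) (out : String) : Prop := out = triple_vowels_alt text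
instance (text : String) (out : String) : Decidable (Spec_triple_vowels text out) := by unfold Spec_triple_vowels; infer_instance

-- ===== CLAIM (what is proved, stated in full; the proofs are below) =====
def Claim_equal_triple_vowels : Prop := ∀ (text : String), Dom_triple_vowels text → Spec_triple_vowels text (triple_vowels text)

-- ===== LEMMAS AND PROOFS =====

-- per-character agreement: the table lookup with default equals A's branch
lemma tvTable_eq : tvTable = PySem.Dict.mk
    [('A',['A','A','A']),('E',['E','E','E']),('I',['I','I','I']),('O',['O','O','O']),
     ('U',['U','U','U']),('a',['a','a','a']),('e',['e','e','e']),('i',['i','i','i']),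
     ('o',['o','o','o']),('u',['u','u','u'])] := by decide

lemma tvTable_get (c : Char) :
    (tvTable.get? c).getD [c] =
      if c ∈ (['A','E','I','O','U','a','e','i','o','u'] : List Char) then [c, c, c] else [c] := by
  by_cases h : c ∈ (['A','E','I','O','U','a','e','i','o','u'] : List Char)
  · simp only [List.mem_cons, List.not_mem_nil, or_false] at h
    rcases h with h | h | h | h | h | h | h | h | h | h <;> subst h <;> decide
  · rw [if_neg h, tvTable_eq]
    simp only [List.mem_cons, List.not_mem_nil, or_false, not_or] at h
    obtain ⟨h1, h2, h3, h4, h5, h6, h7, h8, h9, h10⟩ := h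
    simp [PySem.Dict.get?, Ne.symm h1, Ne.symm h2, Ne.symm h3,
      Ne.symm h4, Ne.symm h5, Ne.symm h6, Ne.symm h7, Ne.symm h8, Ne.symm h9, Ne.symm h10]

-- ===== VERDICT (by name: the statement is the Claim_ definition above) =====
theorem triple_vowels_spec : Claim_equal_triple_vowels := by
  intro text _
  unfold Spec_triple_vowels triple_vowels triple_vowels_alt
  simp only []
  rw [List.foldl_ext _ (fun acc c => acc ++ (tvTable.get? c).getD [c]) []
        (fun acc c _ => by simp only [tvTable_get]; split <;> rfl),
      PySem.List.foldl_append_eq_flatMap, List.nil_append]
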